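-- pv_equiv track=rewrite | github.com/Usman-Rasheed-Siddiqui/Data-Structure-And-Algorithm | Lab5/Lb5_exd.py | STORETRIDIAGONAL
-- ===== SOURCE A (Python) =====
-- def STORETRIDIAGONAL(B, n):
--     U = [0]*n
--
--     i = 0
--     for j in range(len(B)):
--         for k in range(len(B)):
--             if abs(j - k) <= 1:
--                 U[i] = B[j][k]
--                 i += 1
--             else:
--                 U[i] = 0
--     return U
-- ===== SOURCE B (Python) =====
-- def STORETRIDIAGONAL(B, n):
--     m = len(B)
--     band = [B[j][k] for j in range(m)
--                     for k in range(max(0, j - 1), min(j + 1, m - 1) + 1)]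
--     return band + [0] * (n - len(band))
-- ===== Notes on version B (the rewrite author's own statement) =====
-- stated objective: alternative
-- what changed: B visits only the at-most-3 band positions per row via a comprehension over range(max(0,j-1), min(j+1,m-1)+1) and pads with zeros once, instead of A's nested m*m scan writing into a preallocated array with a running index (O(m) vs O(m^2) in the row count, though both share the O(n) output allocation); Pre_ excludes exactly the inputs where A raises IndexError (band size 3m-2 exceeding n, or a row shorter than its band span).
import Mathlib
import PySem

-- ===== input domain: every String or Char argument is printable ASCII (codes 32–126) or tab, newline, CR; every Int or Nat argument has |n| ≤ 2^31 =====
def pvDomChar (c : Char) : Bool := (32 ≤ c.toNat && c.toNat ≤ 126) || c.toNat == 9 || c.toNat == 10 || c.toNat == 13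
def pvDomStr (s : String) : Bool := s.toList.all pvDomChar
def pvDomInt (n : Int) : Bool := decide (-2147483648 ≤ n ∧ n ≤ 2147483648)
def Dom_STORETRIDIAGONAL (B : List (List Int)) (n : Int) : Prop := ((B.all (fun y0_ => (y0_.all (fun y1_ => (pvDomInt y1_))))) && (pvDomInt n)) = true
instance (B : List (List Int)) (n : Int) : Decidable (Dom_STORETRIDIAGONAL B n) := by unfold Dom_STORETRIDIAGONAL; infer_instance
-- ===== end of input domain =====

-- B replaces A's nested m×m scan (with a running write index into a preallocated
-- array) by a single pass over only the band positions per row, padded with zeros.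

-- ===== PORT A =====
-- Literal port of A: U = [0]*n; nested loops over range(len(B)); band writes U[i]=B[j][k]
-- and advance i, else writes U[i]=0 (no advance).  Writes are List.set; Pre_ keeps the
-- inputs where Python's U[i] never goes out of range (else it would raise IndexError).
def STORETRIDIAGONAL (B : List (List Int)) (n : Int) : List Int :=
  let U : List Int := List.replicate n.toNat 0
  ((List.range B.length).foldl (fun (st : List Int × Nat) (j : Nat) =>
    (List.range B.length).foldl (fun (st : List Int × Nat) (k : Nat) =>
      if ((j : Int) - (k : Int)).natAbs ≤ 1 then
        (st.1.set st.2 ((B.getD j []).getD k 0), st.2 + 1)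
      else
        (st.1.set st.2 0, st.2)) st) (U, 0)).1

-- ===== PORT B =====
-- Literal port of Source B: band = [B[j][k] for j in range(m) for k in range(max(0,j-1), min(j+1,m-1)+1)];
-- band + [0]*(n - len(band)).  Nat subtraction j-1 is Python's max(0, j-1).
def STORETRIDIAGONAL_alt (B : List (List Int)) (n : Int) : List Int :=
  let m := B.length
  let band : List Int := (List.range m).flatMap (fun j =>
    (List.range' (j - 1) (min (j + 1) (m - 1) + 1 - (j - 1))).map
      (fun k => (B.getD j []).getD k 0))
  band ++ List.replicate ((n : Int) - band.length).toNat 0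

-- ===== PRECONDITION & SPEC =====
-- Pre_ is exactly where Python A returns: either B is empty, or the 3·m−2 band writes fit
-- into U (3m−2 ≤ n) and each row j is long enough for its band columns; outside this A
-- raises IndexError.
def Pre_STORETRIDIAGONAL (B : List (List Int)) (n : Int) : Prop :=
  B = [] ∨ (3 * (B.length : Int) - 2 ≤ n ∧
    ∀ j ∈ List.range B.length, min (j + 1) (B.length - 1) < (B.getD j []).length)

instance (B : List (List Int)) (n : Int) : Decidable (Pre_STORETRIDIAGONAL B n) := by
  unfold Pre_STORETRIDIAGONAL; infer_instance

def pvWitness_STORETRIDIAGONAL : List (List Int) × Int := ([[1, 2], [3, 4]], 4)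

def Spec_STORETRIDIAGONAL (B : List (List Int)) (n : Int) (out : List Int) : Prop := out = STORETRIDIAGONAL_alt B n
instance (B : List (List Int)) (n : Int) (out : List Int) : Decidable (Spec_STORETRIDIAGONAL B n out) := by unfold Spec_STORETRIDIAGONAL; infer_instance

-- ===== CLAIM (what is proved, stated in full; the proofs are below) =====
def Claim_equal_STORETRIDIAGONAL : Prop := ∀ (B : List (List Int)) (n : Int), Dom_STORETRIDIAGONAL B n → Pre_STORETRIDIAGONAL B n → Spec_STORETRIDIAGONAL B n (STORETRIDIAGONAL B n)
-- ===== LEMMAS AND PROOFS =====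

-- value fetched by both ports at band position (j,k)
def pvG (B : List (List Int)) (j k : Nat) : Int := (B.getD j []).getD k 0

-- A's inner-loop step
def pvF (B : List (List Int)) (j : Nat) (st : List Int × Nat) (k : Nat) : List Int × Nat :=
  if ((j : Int) - (k : Int)).natAbs ≤ 1 then
    (st.1.set st.2 (pvG B j k), st.2 + 1)
  else
    (st.1.set st.2 0, st.2)

-- band width of row j when there are m rows
def pvW (m j : Nat) : Nat := min (j + 1) (m - 1) + 1 - (j - 1)

-- band values of the rows in rs
def pvBand (B : List (List Int)) (rs : List Nat) : List Int :=
  rs.flatMap (fun j => (List.range' (j - 1) (pvW B.length j)).map (pvG B j))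

lemma pvA_eq (B : List (List Int)) (n : Int) :
    STORETRIDIAGONAL B n =
      ((List.range B.length).foldl
        (fun st j => (List.range B.length).foldl (pvF B j) st)
        (List.replicate n.toNat 0, 0)).1 := rfl

lemma pvAlt_eq (B : List (List Int)) (n : Int) :
    STORETRIDIAGONAL_alt B n =
      pvBand B (List.range B.length)
        ++ List.replicate ((n : Int) - (pvBand B (List.range B.length)).length).toNat 0 := rfl

lemma pvSet_self (P : List Int) : P.set P.length 0 = P := by
  induction P with
  | nil => rfl
  | cons a P ih => simp [ih]

lemma pvSet_at_len (P ys : List Int) (x : Int) :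
    (P ++ ys).set P.length x = P ++ ys.set 0 x := by
  induction P with
  | nil => simp
  | cons a P ih => simp [ih]

lemma pvSet_zero (P : List Int) (z : Nat) :
    (P ++ List.replicate z 0).set P.length 0 = P ++ List.replicate z 0 := by
  cases z with
  | zero => simpa using pvSet_self P
  | succ z => rw [pvSet_at_len]; simp [List.replicate_succ]

lemma pvSet_band (P : List Int) (z : Nat) (x : Int) :
    (P ++ List.replicate (z + 1) 0).set P.length x = (P ++ [x]) ++ List.replicate z 0 := by
  rw [pvSet_at_len]; simp [List.replicate_succ]

-- a run of non-band columns leaves the state unchanged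
lemma pvSkip (B : List (List Int)) (j : Nat) (ks : List Nat)
    (h : ∀ k ∈ ks, ¬ ((j : Int) - (k : Int)).natAbs ≤ 1) (P : List Int) (z : Nat) :
    ks.foldl (pvF B j) (P ++ List.replicate z 0, P.length) = (P ++ List.replicate z 0, P.length) := by
  induction ks with
  | nil => rfl
  | cons k ks ih =>
      have hk := h k (List.mem_cons_self)
      simp only [List.foldl_cons, pvF, if_neg hk, pvSet_zero]
      exact ih (fun k hk => h k (List.mem_cons_of_mem _ hk))

-- a run of band columns appends their values and advances the index
lemma pvTake (B : List (List Int)) (j : Nat) (ks : List Nat)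
    (h : ∀ k ∈ ks, ((j : Int) - (k : Int)).natAbs ≤ 1) :
    ∀ (P : List Int) (z : Nat), ks.length ≤ z →
    ks.foldl (pvF B j) (P ++ List.replicate z 0, P.length)
      = (P ++ ks.map (pvG B j) ++ List.replicate (z - ks.length) 0, P.length + ks.length) := by
  induction ks with
  | nil => intro P z _; simp
  | cons k ks ih =>
      intro P z hz
      obtain ⟨z', rfl⟩ : ∃ z', z = z' + 1 := ⟨z - 1, by simp at hz; omega⟩
      have hk := h k (List.mem_cons_self)
      simp only [List.foldl_cons, pvF, if_pos hk, pvSet_band]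
      rw [show P.length + 1 = (P ++ [pvG B j k]).length from by simp]
      rw [ih (fun k hk => h k (List.mem_cons_of_mem _ hk)) (P ++ [pvG B j k]) z'
        (by simp at hz ⊢; omega)]
      simp only [List.map_cons, List.length_cons, Prod.mk.injEq]
      constructor
      · rw [show z' + 1 - (ks.length + 1) = z' - ks.length from by omega]
        simp [List.append_assoc]
      · simp; omega

-- one full inner loop over a row j
lemma pvRow (B : List (List Int)) (j : Nat) (hj : j < B.length) (P : List Int) (z : Nat)
    (hz : pvW B.length j ≤ z) :
    (List.range B.length).foldl (pvF B j) (P ++ List.replicate z 0, P.length)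
      = (P ++ (List.range' (j - 1) (pvW B.length j)).map (pvG B j)
            ++ List.replicate (z - pvW B.length j) 0,
         P.length + pvW B.length j) := by
  set m := B.length with hm
  set lo := j - 1 with hlo
  set w := pvW m j with hwdef
  have hww : w = min (j + 1) (m - 1) + 1 - (j - 1) := rfl
  have hle : lo + w ≤ m := by omega
  have hsplit : List.range' 0 lo ++ (List.range' lo w ++ List.range' (lo + w) (m - (lo + w)))
      = List.range m := by
    rw [List.range'_append_1]
    rw [show List.range' lo (w + (m - (lo + w))) = List.range' (0 + lo) (w + (m - (lo + w)))
      from by norm_num]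
    rw [List.range'_append_1, List.range_eq_range']
    congr 1
    omega
  rw [← hsplit, List.foldl_append, List.foldl_append]
  rw [pvSkip B j _ (by
    intro k hk
    rw [List.mem_range'_1] at hk
    omega)]
  rw [pvTake B j _ (by
    intro k hk
    rw [List.mem_range'_1] at hk
    omega) P z (by simpa using hz)]
  simp only [List.length_range']
  rw [show P.length + w = (P ++ (List.range' lo w).map (pvG B j)).length from by simp,
      show P ++ (List.range' lo w).map (pvG B j) ++ List.replicate (z - w) 0
         = (P ++ (List.range' lo w).map (pvG B j)) ++ List.replicate (z - w) 0 from by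
        simp [List.append_assoc]]
  rw [pvSkip B j _ (by
    intro k hk
    rw [List.mem_range'_1] at hk
    omega)]

-- the outer loop over a list of rows
lemma pvOuter (B : List (List Int)) (rs : List Nat) :
    (∀ j ∈ rs, j < B.length) →
    ∀ (P : List Int) (z : Nat), (pvBand B rs).length ≤ z →
    rs.foldl (fun st j => (List.range B.length).foldl (pvF B j) st) (P ++ List.replicate z 0, P.length)
      = (P ++ pvBand B rs ++ List.replicate (z - (pvBand B rs).length) 0,
         P.length + (pvBand B rs).length) := by
  induction rs with
  | nil => intro _ P z _; simp [pvBand]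
  | cons j rs ih =>
      intro hmem P z hz
      have hband : pvBand B (j :: rs)
          = (List.range' (j - 1) (pvW B.length j)).map (pvG B j) ++ pvBand B rs := by
        simp [pvBand]
      have hlen : (pvBand B (j :: rs)).length = pvW B.length j + (pvBand B rs).length := by
        rw [hband]; simp
      rw [hlen, hband]
      simp only [List.foldl_cons]
      rw [pvRow B j (hmem j (List.mem_cons_self)) P z (by omega)]
      rw [show P.length + pvW B.length j
            = (P ++ (List.range' (j - 1) (pvW B.length j)).map (pvG B j)).length from by simp,
          show P ++ (List.range' (j - 1) (pvW B.length j)).map (pvG B j)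
                ++ List.replicate (z - pvW B.length j) 0
             = (P ++ (List.range' (j - 1) (pvW B.length j)).map (pvG B j))
                ++ List.replicate (z - pvW B.length j) 0 from by simp [List.append_assoc]]
      rw [ih (fun j hj => hmem j (List.mem_cons_of_mem _ hj)) _ _ (by rw [hlen] at hz; omega)]
      simp only [Prod.mk.injEq]
      constructor
      · rw [show z - pvW B.length j - (pvBand B rs).length
            = z - (pvW B.length j + (pvBand B rs).length) from by omega]
        simp [List.append_assoc]
      · simp; omega

-- total band size of all m rows is at most 3m - 2
lemma pvW_sum : ∀ (m : Nat), ((List.range m).map (fun j => pvW m j)).sum ≤ 3 * m - 2 := by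
  intro m
  match m with
  | 0 => simp
  | 1 => simp [pvW]
  | (m' + 2) =>
      have h1 : List.range' 0 1 ++ (List.range' 1 m' ++ List.range' (1 + m') 1)
          = List.range (m' + 2) := by
        rw [List.range'_append_1]
        rw [show List.range' 1 (m' + 1) = List.range' (0 + 1) (m' + 1) from by norm_num]
        rw [List.range'_append_1, List.range_eq_range']
        congr 1
        omega
      rw [← h1]
      have hmid : (List.range' 1 m').map (fun j => pvW (m' + 2) j) = List.replicate m' 3 := by
        have hx : ∀ x ∈ (List.range' 1 m').map (fun j => pvW (m' + 2) j), x = 3 := by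
          intro x hx
          rw [List.mem_map] at hx
          obtain ⟨j, hj, rfl⟩ := hx
          rw [List.mem_range'_1] at hj
          simp only [pvW]
          omega
        simpa using List.eq_replicate_of_mem hx
      simp only [List.map_append, List.sum_append, hmid, List.sum_replicate, List.range'_one,
        List.map_cons, List.map_nil, List.sum_cons, List.sum_nil, smul_eq_mul]
      simp only [pvW]
      omega

lemma pvBand_len (B : List (List Int)) :
    (pvBand B (List.range B.length)).length ≤ 3 * B.length - 2 := by
  unfold pvBand
  rw [List.length_flatMap]
  have : ∀ j, ((List.range' (j - 1) (pvW B.length j)).map (pvG B j)).length = pvW B.length j := by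
    intro j; simp
  simpa [this] using pvW_sum B.length

-- ===== VERDICT (by name: the statement is the Claim_ definition above) =====
theorem STORETRIDIAGONAL_spec : Claim_equal_STORETRIDIAGONAL := by
  intro B n _ hpre
  unfold Spec_STORETRIDIAGONAL
  by_cases hB : B = []
  · subst hB
    rw [pvA_eq, pvAlt_eq]
    simp [pvBand]
  · have hm : 1 ≤ B.length := by
      cases B with
      | nil => exact absurd rfl hB
      | cons r B => simp
    rcases hpre with h | ⟨h, _⟩
    · exact absurd h hB
    have hb := pvBand_len B
    have hlenI : ((pvBand B (List.range B.length)).length : Int) ≤ n := by omega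
    have hz : (pvBand B (List.range B.length)).length ≤ n.toNat := by omega
    have hout := pvOuter B (List.range B.length) (by intro j hj; simpa using hj) [] n.toNat hz
    rw [pvA_eq, pvAlt_eq]
    simp only [List.nil_append, List.length_nil] at hout
    rw [hout]
    simp only
    congr 1
    congr 1
    omega
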